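-- pv_equiv track=rewrite | github.com/telinii/Agente-IA | agente/logic_parser.py | validar_formula
-- ===== SOURCE A (Python) =====
-- def validar_formula(formula):
--     """Verifica se uma fórmula está sintaticamente correta."""
--     formula = formula.replace(" ", "")
--     parenteses = 0
--     for c in formula:
--         if c == "(":
--             parenteses += 1
--         elif c == ")":
--             parenteses -= 1
--         if parenteses < 0:
--             return False
--     return parenteses == 0
-- ===== SOURCE B (Python) =====
-- def validar_formula(formula):
--     """Verifica se uma fórmula está sintaticamente correta."""
--     s = "".join(c for c in formula if c in "()")
--     while "()" in s:
--         s = s.replace("()", "")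
--     return s == ""
-- ===== Notes on version B (the rewrite author's own statement) =====
-- stated objective: alternative
-- what changed: Replaces the counter loop by a string-rewriting algorithm: keep only the parenthesis characters, then repeatedly delete all adjacent open-close pairs until a fixpoint; the formula is balanced iff the fixpoint is the empty string.
import Mathlib
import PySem

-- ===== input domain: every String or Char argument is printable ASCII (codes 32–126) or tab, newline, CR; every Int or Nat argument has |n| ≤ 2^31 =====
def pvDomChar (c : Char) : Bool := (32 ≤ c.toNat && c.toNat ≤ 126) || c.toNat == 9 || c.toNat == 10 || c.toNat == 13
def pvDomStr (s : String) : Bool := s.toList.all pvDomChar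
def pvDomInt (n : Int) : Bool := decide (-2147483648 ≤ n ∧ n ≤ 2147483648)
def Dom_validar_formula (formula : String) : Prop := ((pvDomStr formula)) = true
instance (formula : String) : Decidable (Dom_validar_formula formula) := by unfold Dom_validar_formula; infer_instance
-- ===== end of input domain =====

-- B rewrites to a fixpoint (keep parens, repeatedly delete adjacent open-close pairs) instead of counting; return value only.

-- ===== PORT A =====
-- A's loop: one counter, early exit as soon as it goes negative.
def pvGoA : List Char → Int → Bool
  | [], p => p == 0
  | c :: cs, p =>
    let p' := if c = '(' then p + 1 else if c = ')' then p - 1 else p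
    if p' < 0 then false else pvGoA cs p'

def validar_formula (formula : String) : Bool :=
  pvGoA (PySem.Str.replace formula " " "").toList 0

-- ===== PORT B =====
def pvIsParen (c : Char) : Bool := c == '(' || c == ')'

-- one s.replace("()", "") pass: delete the left-to-right non-overlapping "()" occurrences
def pvRemovePairs : List Char → List Char
  | [] => []
  | [c] => [c]
  | c :: d :: rest =>
    if c = '(' ∧ d = ')' then pvRemovePairs rest else c :: pvRemovePairs (d :: rest)

theorem pvRemovePairs_sublist : ∀ s : List Char, List.Sublist (pvRemovePairs s) s := by
  intro s
  induction s using pvRemovePairs.induct with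
  | case1 => simp [pvRemovePairs]
  | case2 c => simp [pvRemovePairs]
  | case3 c d rest h ih =>
    simp only [pvRemovePairs, if_pos h]
    exact ih.trans ((List.sublist_cons_self _ _).trans (List.sublist_cons_self _ _))
  | case4 c d rest h ih =>
    simp only [pvRemovePairs, if_neg h]
    exact ih.cons₂ c

theorem pvRemovePairs_length_lt : ∀ s : List Char, ['(', ')'] <:+: s →
    (pvRemovePairs s).length < s.length := by
  intro s
  induction s using pvRemovePairs.induct with
  | case1 => intro h; simp at h
  | case2 c =>
    intro h
    have hle := List.IsInfix.length_le h
    simp at hle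
  | case3 c d rest h ih =>
    intro _
    simp only [pvRemovePairs, if_pos h, List.length_cons]
    have := (pvRemovePairs_sublist rest).length_le
    omega
  | case4 c d rest h ih =>
    intro hinf
    rcases List.infix_cons_iff.mp hinf with hpre | hrest
    · rcases hpre with ⟨t, ht⟩
      simp only [List.cons_append, List.cons.injEq] at ht
      exact absurd ⟨ht.1.symm, ht.2.1.symm⟩ h
    · simp only [pvRemovePairs, if_neg h, List.length_cons]
      exact Nat.succ_lt_succ (ih hrest)

-- the while loop: cancel until "()" no longer occurs
def pvCancel (s : List Char) : List Char :=
  if PySem.Chars.isIn ['(', ')'] s then pvCancel (pvRemovePairs s) else s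
termination_by s.length
decreasing_by exact pvRemovePairs_length_lt s ((PySem.Chars.isIn_iff_infix _ _).mp (by assumption))

def validar_formula_alt (formula : String) : Bool :=
  pvCancel (formula.toList.filter pvIsParen) == []

-- ===== PRECONDITION & SPEC =====
def Spec_validar_formula (formula : String) (out : Bool) : Prop := out = validar_formula_alt formula
instance (formula : String) (out : Bool) : Decidable (Spec_validar_formula formula out) := by unfold Spec_validar_formula; infer_instance

-- ===== CLAIM (what is proved, stated in full; the proofs are below) =====
def Claim_equal_validar_formula : Prop := ∀ (formula : String), Dom_validar_formula formula → Spec_validar_formula formula (validar_formula formula)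

-- ===== LEMMAS AND PROOFS =====

-- replace(" ", "") is the filter dropping spaces
theorem pvReplace_go_space (l : List Char) : ∀ (fuel : Nat) (acc : List Char),
    l.length ≤ fuel →
    PySem.Chars.replace.go [' '] [] fuel l acc = acc.reverse ++ l.filter (fun c => !(c == ' ')) := by
  induction l with
  | nil =>
    intro fuel acc _
    cases fuel <;> simp [PySem.Chars.replace.go]
  | cons c t ih =>
    intro fuel acc hlen
    cases fuel with
    | zero => simp at hlen
    | succ f =>
      simp only [PySem.Chars.replace.go]
      by_cases hc : c = ' '
      · have hpre : List.isPrefixOf [' '] (c :: t) = true := by simp [List.isPrefixOf, hc]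
        simp only [hpre, if_true, List.length_cons, List.length_nil, List.drop_succ_cons,
          List.drop_zero, List.reverse_nil, List.nil_append]
        rw [ih f acc (by simpa using hlen)]
        simp [hc]
      · have hpre : List.isPrefixOf [' '] (c :: t) = false := by
          simp [List.isPrefixOf]; exact fun h => hc h.symm
        simp only [hpre, Bool.false_eq_true, if_false]
        rw [ih f (c :: acc) (by simpa using Nat.le_of_succ_le_succ hlen)]
        simp [hc]

theorem pvReplace_space (s : String) :
    (PySem.Str.replace s " " "").toList = s.toList.filter (fun c => !(c == ' ')) := by
  rw [PySem.Str.toList_replace]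
  show PySem.Chars.replace s.toList [' '] [] = _
  unfold PySem.Chars.replace
  simp only [List.isEmpty_cons, Bool.false_eq_true, if_false]
  simpa using pvReplace_go_space s.toList s.toList.length [] le_rfl

-- non-paren characters are neutral for A's loop (as long as the counter is ≥ 0)
theorem pvGoA_filter (l : List Char) : ∀ p : Int, 0 ≤ p →
    pvGoA l p = pvGoA (l.filter pvIsParen) p := by
  induction l with
  | nil => intro p _; rfl
  | cons c t ih =>
    intro p hp
    by_cases hP : pvIsParen c = true
    · rw [List.filter_cons_of_pos hP]
      simp only [pvGoA]
      by_cases hneg : (if c = '(' then p + 1 else if c = ')' then p - 1 else p) < 0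
      · rw [if_pos hneg, if_pos hneg]
      · rw [if_neg hneg, if_neg hneg]
        exact ih _ (by omega)
    · rw [List.filter_cons_of_neg (by simpa using hP)]
      have h1 : ¬ c = '(' := fun hc => hP (by simp [pvIsParen, hc])
      have h2 : ¬ c = ')' := fun hc => hP (by simp [pvIsParen, hc])
      simp only [pvGoA, if_neg h1, if_neg h2, if_neg (show ¬ p < 0 by omega)]
      exact ih p hp

-- deleting adjacent "()" pairs does not change A's verdict
theorem pvGoA_removePairs : ∀ s : List Char, ∀ p : Int, 0 ≤ p →
    pvGoA s p = pvGoA (pvRemovePairs s) p := by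
  intro s
  induction s using pvRemovePairs.induct with
  | case1 => intro p _; rfl
  | case2 c => intro p _; rfl
  | case3 c d rest h ih =>
    intro p hp
    obtain ⟨hc, hd⟩ := h
    subst hc; subst hd
    rw [show pvRemovePairs ('(' :: ')' :: rest) = pvRemovePairs rest from by
      simp [pvRemovePairs]]
    have e1 : pvGoA ('(' :: ')' :: rest) p = pvGoA rest p := by
      simp only [pvGoA, if_true]
      rw [if_neg (show ¬ (p + 1 : Int) < 0 by omega)]
      rw [show (if (')' : Char) = '(' then p + 1 + 1 else p + 1 - 1) = p from by
        rw [if_neg (show ¬ ((')' : Char) = '(') by decide)]; omega]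
      rw [if_neg (show ¬ (p : Int) < 0 by omega)]
    rw [e1]
    exact ih p hp
  | case4 c d rest h ih =>
    intro p hp
    simp only [pvRemovePairs, if_neg h]
    simp only [pvGoA]
    by_cases hneg : (if c = '(' then p + 1 else if c = ')' then p - 1 else p) < 0
    · rw [if_pos hneg, if_pos hneg]
    · rw [if_neg hneg, if_neg hneg]
      exact ih _ (by omega)

theorem pvGoA_cancel (s : List Char) : ∀ p : Int, 0 ≤ p →
    pvGoA s p = pvGoA (pvCancel s) p := by
  induction s using pvCancel.induct with
  | case1 s hin ih =>
    intro p hp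
    rw [pvCancel, if_pos hin, pvGoA_removePairs s p hp]
    exact ih p hp
  | case2 s hin =>
    intro p _
    rw [pvCancel, if_neg hin]

theorem pvCancel_not_infix (s : List Char) : ¬ ['(', ')'] <:+: pvCancel s := by
  induction s using pvCancel.induct with
  | case1 s hin ih => rw [pvCancel, if_pos hin]; exact ih
  | case2 s hin =>
    rw [pvCancel, if_neg hin]
    exact (PySem.Chars.isIn_eq_false_iff _ _).mp (by revert hin; cases PySem.Chars.isIn ['(', ')'] s <;> simp)

theorem pvCancel_sublist (s : List Char) : List.Sublist (pvCancel s) s := by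
  induction s using pvCancel.induct with
  | case1 s hin ih => rw [pvCancel, if_pos hin]; exact ih.trans (pvRemovePairs_sublist s)
  | case2 s hin => rw [pvCancel, if_neg hin]

-- a paren-only list starting with '(' and containing no "()" is all '('
theorem pvAllOpen (l : List Char) : (∀ c ∈ l, pvIsParen c = true) →
    ¬ ['(', ')'] <:+: l → l.head? = some '(' → ∀ c ∈ l, c = '(' := by
  induction l with
  | nil => intro _ _ _ c hc; simp at hc
  | cons a t ih =>
    intro hpar hni hhead c hc
    simp only [List.head?_cons, Option.some.injEq] at hhead
    subst hhead
    rcases List.mem_cons.mp hc with rfl | hc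
    · rfl
    cases t with
    | nil => simp at hc
    | cons d t2 =>
      have hd : d = '(' := by
        have := hpar d (by simp)
        simp only [pvIsParen, Bool.or_eq_true, beq_iff_eq] at this
        rcases this with h | h
        · exact h
        · exact absurd (show ['(', ')'] <:+: '(' :: d :: t2 from ⟨[], t2, by simp [h]⟩) hni
      exact ih (fun x hx => hpar x (by simp [hx]))
        (fun hinf => hni (List.infix_cons_iff.mpr (Or.inr hinf)))
        (by simp [hd]) c hc

theorem pvGoA_allOpen (l : List Char) : ∀ p : Int, 0 ≤ p → (∀ c ∈ l, c = '(') →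
    pvGoA l p = decide (p + l.length = 0) := by
  induction l with
  | nil =>
    intro p _ _
    by_cases h : p = 0 <;> simp [pvGoA, h]
  | cons a t ih =>
    intro p hp hall
    have ha : a = '(' := hall a (by simp)
    subst ha
    simp only [pvGoA, if_true]
    rw [if_neg (show ¬ (p + 1 : Int) < 0 by omega)]
    rw [ih (p + 1) (by omega) (fun c hc => hall c (by simp [hc]))]
    simp only [List.length_cons]
    congr 1
    simp only [eq_iff_iff]
    push_cast
    omega

-- at the fixpoint: a paren-only "()"-free list passes A's check iff it is empty
theorem pvGoA_fixpoint (l : List Char) (hpar : ∀ c ∈ l, pvIsParen c = true)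
    (hni : ¬ ['(', ')'] <:+: l) : pvGoA l 0 = (l == []) := by
  cases l with
  | nil => rfl
  | cons a t =>
    have ha := hpar a (by simp)
    simp only [pvIsParen, Bool.or_eq_true, beq_iff_eq] at ha
    rcases ha with ha | ha
    · subst ha
      have hall := pvAllOpen ('(' :: t) hpar hni (by simp)
      rw [pvGoA_allOpen ('(' :: t) 0 le_rfl hall]
      simp only [List.length_cons]
      rw [show (('(' :: t == []) = false) from rfl]
      simp only [decide_eq_false_iff_not]
      push_cast
      omega
    · subst ha
      simp only [pvGoA, if_true]
      rw [show (if (')' : Char) = '(' then (0 : Int) + 1 else 0 - 1) = -1 from by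
        rw [if_neg (show ¬ ((')' : Char) = '(') by decide)]; omega]
      rw [if_pos (show (-1 : Int) < 0 by omega)]
      rfl

-- ===== VERDICT (by name: the statement is the Claim_ definition above) =====
theorem validar_formula_spec : Claim_equal_validar_formula := by
  intro formula _
  unfold Spec_validar_formula validar_formula validar_formula_alt
  rw [pvReplace_space]
  rw [pvGoA_filter _ 0 le_rfl]
  rw [List.filter_filter]
  rw [List.filter_congr (l := formula.toList)
      (q := pvIsParen)
      (fun c _ => by
        by_cases h1 : c = '('
        · simp [pvIsParen, h1]
        · by_cases h2 : c = ')'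
          · simp [pvIsParen, h2]
          · simp [pvIsParen, h1, h2])]
  rw [pvGoA_cancel _ 0 le_rfl]
  exact pvGoA_fixpoint _
    (fun c hc => List.of_mem_filter ((pvCancel_sublist _).mem hc))
    (pvCancel_not_infix _)
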